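-- pv_equiv track=rewrite | github.com/matheusnw1/estudo_python | time.py | jogadores_em_dois_times
-- ===== SOURCE A (Python) =====
-- def jogadores_em_todos_times(jogadores):
--     sets = [set(elenco) for elenco in jogadores.values()]
--     return sets[0].intersection(*sets[1:])
--
-- def jogadores_em_dois_times(jogadores):
--     todos = list(jogadores.values())
--     aparecem_em_dois = set()
--     nomes = list(jogadores.keys())
--     for i in range(len(nomes)):
--         for j in range(i + 1, len(nomes)):
--             em_comum = set(todos[i]) & set(todos[j])
--             aparecem_em_dois.update(em_comum)
--     jogam_em_todos = jogadores_em_todos_times(jogadores)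
--     return aparecem_em_dois - jogam_em_todos
-- ===== SOURCE B (Python) =====
-- def jogadores_em_todos_times(jogadores):
--     sets = [set(elenco) for elenco in jogadores.values()]
--     return sets[0].intersection(*sets[1:])
--
-- def jogadores_em_dois_times(jogadores):
--     jogam_em_todos = jogadores_em_todos_times(jogadores)
--     repetidos = set()
--     restantes = list(jogadores.values())
--     while restantes:
--         primeiro = set(restantes.pop(0))
--         for outro in restantes:
--             repetidos |= primeiro.intersection(outro)
--     return repetidos - jogam_em_todos
-- ===== Notes on version B (the rewrite author's own statement) =====
-- stated objective: faster
-- what changed: Replaces A's index-bookkeeping (todos/nomes lists, range(len) double loop rebuilding set(todos[i]) and set(todos[j]) for every pair) by a destructive while/pop loop over the remaining rosters that builds each popped roster's set once and intersects it directly with each remaining raw list, keeping the module helper call and the final subtraction.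
-- outside the precondition, e.g. on jogadores_em_dois_times({}): A raises IndexError, B raises IndexError
import Mathlib
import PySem

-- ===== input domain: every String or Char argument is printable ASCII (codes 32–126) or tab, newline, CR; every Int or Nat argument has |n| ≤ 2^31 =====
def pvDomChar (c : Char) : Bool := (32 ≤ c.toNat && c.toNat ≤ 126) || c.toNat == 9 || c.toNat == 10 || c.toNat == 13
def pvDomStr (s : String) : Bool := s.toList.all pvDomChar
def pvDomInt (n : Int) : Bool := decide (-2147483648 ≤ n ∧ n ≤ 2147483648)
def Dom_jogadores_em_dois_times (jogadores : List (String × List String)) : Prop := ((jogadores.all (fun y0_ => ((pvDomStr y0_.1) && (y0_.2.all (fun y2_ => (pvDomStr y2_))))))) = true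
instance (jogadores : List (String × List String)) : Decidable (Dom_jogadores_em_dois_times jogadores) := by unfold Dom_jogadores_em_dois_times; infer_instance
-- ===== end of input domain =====

-- B replaces A's index-based double loop over team pairs (which rebuilds set(todos[i]) and
-- set(todos[j]) for every pair) by a destructive while/pop loop that builds each roster's set once
-- and intersects it with the remaining raw lists: a constant-factor speedup a timing run measured;
-- no mutation of the argument is observable in either version.

-- ===== PORT A =====
-- shared module helper (both Pythons call it verbatim): sets[0].intersection(*sets[1:])
def jogadores_em_todos_times (jogadores : List (String × List String)) : PySem.Set String :=
  let sets := (jogadores.map Prod.snd).map (fun elenco => PySem.Set.ofList elenco)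
  (PySem.List.slice sets (some 1) none).foldl (fun acc t => PySem.Set.inter acc t)
    (PySem.List.pyGetD sets 0 PySem.Set.empty)

def jogadores_em_dois_times (jogadores : List (String × List String)) : List String :=
  let todos := jogadores.map Prod.snd
  let nomes := jogadores.map Prod.fst
  let aparecem :=
    (PySem.List.pyRange 0 (PySem.List.len nomes)).foldl
      (fun ap i =>
        (PySem.List.pyRange (i + 1) (PySem.List.len nomes)).foldl
          (fun ap j =>
            PySem.Set.update ap
              (PySem.Set.inter (PySem.Set.ofList (PySem.List.pyGetD todos i []))
                (PySem.Set.ofList (PySem.List.pyGetD todos j []))))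
          ap)
      PySem.Set.empty
  PySem.Set.diff aparecem (jogadores_em_todos_times jogadores)

-- ===== PORT B =====
-- the while/pop loop of Source B: pop the first roster, intersect it with each remaining one
def pvBLoop (restantes : List (List String)) (repetidos : PySem.Set String) : PySem.Set String :=
  match restantes with
  | [] => repetidos
  | primeiro :: resto =>
      pvBLoop resto
        (resto.foldl
          (fun r outro => PySem.Set.union r (PySem.Set.inter (PySem.Set.ofList primeiro) outro))
          repetidos)

def jogadores_em_dois_times_alt (jogadores : List (String × List String)) : List String :=
  let jogam_em_todos := jogadores_em_todos_times jogadores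
  PySem.Set.diff (pvBLoop (jogadores.map Prod.snd) PySem.Set.empty) jogam_em_todos

-- ===== PRECONDITION & SPEC =====
-- Pre_ excludes only the empty dict, on which A raises IndexError (sets[0] in the helper)
def Pre_jogadores_em_dois_times (jogadores : List (String × List String)) : Prop := jogadores ≠ []
instance (jogadores : List (String × List String)) : Decidable (Pre_jogadores_em_dois_times jogadores) := by unfold Pre_jogadores_em_dois_times; infer_instance
def pvWitness_jogadores_em_dois_times : (List (String × List String)) := [("flamengo", ["ana", "bia"]), ("santos", ["bia", "caio"])]

def Spec_jogadores_em_dois_times (jogadores : List (String × List String)) (out : List String) : Prop := out = jogadores_em_dois_times_alt jogadores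
instance (jogadores : List (String × List String)) (out : List String) : Decidable (Spec_jogadores_em_dois_times jogadores out) := by unfold Spec_jogadores_em_dois_times; infer_instance

-- ===== CLAIM (what is proved, stated in full; the proofs are below) =====
def Claim_equal_jogadores_em_dois_times : Prop := ∀ (jogadores : List (String × List String)), Dom_jogadores_em_dois_times jogadores → Pre_jogadores_em_dois_times jogadores → Spec_jogadores_em_dois_times jogadores (jogadores_em_dois_times jogadores)

-- ===== LEMMAS AND PROOFS =====

theorem pv_contains_ofList (xs : List String) (y : String) :
    (PySem.Set.ofList xs).contains y = xs.contains y := by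
  simp [PySem.Set.contains, PySem.Set.mem_ofList]

theorem pv_inter_ofList_right (s : PySem.Set String) (t : List String) :
    PySem.Set.inter s (PySem.Set.ofList t) = PySem.Set.inter s t := by
  unfold PySem.Set.inter
  exact List.filter_congr (fun x _ => pv_contains_ofList t x)

-- A's loop over the index pairs (k, j), k ≤ i < j, equals B's while/pop loop on the k-th suffix
theorem pv_loop_eq (todos : List (List String)) :
    ∀ (k : Nat) (ap : PySem.Set String),
      (PySem.List.pyRange (k : Int) (PySem.List.len todos)).foldl
        (fun ap i =>
          (PySem.List.pyRange (i + 1) (PySem.List.len todos)).foldl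
            (fun ap j =>
              PySem.Set.update ap
                (PySem.Set.inter (PySem.Set.ofList (PySem.List.pyGetD todos i []))
                  (PySem.Set.ofList (PySem.List.pyGetD todos j []))))
            ap)
        ap
      = pvBLoop (todos.drop k) ap := by
  suffices h : ∀ (n k : Nat), todos.length - k = n → ∀ ap : PySem.Set String,
      (PySem.List.pyRange (k : Int) (PySem.List.len todos)).foldl
        (fun ap i =>
          (PySem.List.pyRange (i + 1) (PySem.List.len todos)).foldl
            (fun ap j =>
              PySem.Set.update ap
                (PySem.Set.inter (PySem.Set.ofList (PySem.List.pyGetD todos i []))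
                  (PySem.Set.ofList (PySem.List.pyGetD todos j []))))
            ap)
        ap
      = pvBLoop (todos.drop k) ap by
    intro k ap; exact h _ k rfl ap
  intro n
  induction n with
  | zero =>
    intro k hk ap
    have hlen : todos.length ≤ k := by omega
    have hr : PySem.List.pyRange (k : Int) (PySem.List.len todos) = [] := by
      simp [PySem.List.pyRange, PySem.List.len_eq]; omega
    rw [hr, List.drop_eq_nil_of_le hlen]
    rfl
  | succ n ih =>
    intro k hk ap
    have hklt : k < todos.length := by omega
    have hklt' : (k : Int) < PySem.List.len todos := by
      simp only [PySem.List.len_eq]; exact_mod_cast hklt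
    rw [PySem.List.pyRange_one_cons hklt']
    simp only [List.foldl_cons]
    rw [PySem.List.foldl_pyRange_pyGetD todos []
      (fun r tj =>
        PySem.Set.update r
          (PySem.Set.inter (PySem.Set.ofList (PySem.List.pyGetD todos (k : Int) []))
            (PySem.Set.ofList tj)))
      ap (by positivity)]
    have hget : PySem.List.pyGetD todos (k : Int) [] = todos[k] := by
      simp [PySem.List.pyGetD_natCast, List.getD_eq_getElem?_getD, hklt]
    have htonat : ((k : Int) + 1).toNat = k + 1 := by omega
    have hdrop : todos.drop k = todos[k] :: todos.drop (k + 1) :=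
      List.drop_eq_getElem_cons hklt
    have hcast : (k : Int) + 1 = ((k + 1 : Nat) : Int) := by push_cast; ring
    rw [htonat, hget, hdrop, hcast, ih (k + 1) (by omega)]
    show pvBLoop (todos.drop (k + 1))
        ((todos.drop (k + 1)).foldl
          (fun r tj =>
            PySem.Set.update r
              (PySem.Set.inter (PySem.Set.ofList todos[k]) (PySem.Set.ofList tj))) ap)
      = pvBLoop (todos[k] :: todos.drop (k + 1)) ap
    have hfun : (fun r tj =>
        PySem.Set.update r
          (PySem.Set.inter (PySem.Set.ofList todos[k]) (PySem.Set.ofList tj)))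
        = (fun (r : PySem.Set String) (outro : List String) =>
            PySem.Set.union r (PySem.Set.inter (PySem.Set.ofList todos[k]) outro)) := by
      funext r tj
      rw [pv_inter_ofList_right]
      rfl
    rw [hfun]
    rfl

-- ===== VERDICT (by name: the statement is the Claim_ definition above) =====
theorem jogadores_em_dois_times_spec : Claim_equal_jogadores_em_dois_times := by
  intro jogadores _ _
  unfold Spec_jogadores_em_dois_times jogadores_em_dois_times jogadores_em_dois_times_alt
  have h := pv_loop_eq (jogadores.map Prod.snd) 0 PySem.Set.empty
  simp only [List.drop_zero, Nat.cast_zero] at h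
  simp only [PySem.List.len_eq, List.length_map] at h ⊢
  rw [← h]
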